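-- pv_equiv track=rewrite | github.com/SCHVRevan/Methods_of_cryptographic_information_protection | Lab2-Feistel-linear/createEquation.py | koef_equ2
-- ===== SOURCE A (Python) =====
-- EX_PERMUTATION = [3, 4, 1, 2, 6, 8, 5, 7, 3, 8, 2, 4]
--
-- PERMUTATION = [7, 4, 3, 6, 5, 8, 2, 1]
--
-- def koef_equ2(sbox_equation2):
--     list_equ = []
--
--     x = [0] * 17
--     y = [0] * 16
--     key = [0] * 4
--
--     for i in range(len(sbox_equation2)):
--         for k in range(len(sbox_equation2[i][0])):
--             if sbox_equation2[i][0][k] == "1":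
--                 # Берем элементы 6, 8, 5, 7 из EX_PERMUTATION
--                 index_X = EX_PERMUTATION[k + 4] + 8
--                 # Проверяем, чтобы index_X не выходил за пределы списка x
--                 x[index_X] = 1
--                 key[k] = 1
--
--         for k in range(len(sbox_equation2[i][1]) - 1):
--             if sbox_equation2[i][1][k + 1] == "1":
--                 index_Y = PERMUTATION[k + 3]
--                 # Проверяем, чтобы index_Y не выходил за пределы списка y
--                 y[index_Y] = 1
--
--         list_equ.append([x.copy(), y.copy(), key.copy()])
--         x = [0] * 17
--         y = [0] * 16
--         key = [0] * 4
--
--     for i in range(len(list_equ)):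
--         for k in range(len(list_equ[i][1])):  # Используем длину списка y
--             if list_equ[i][1][k] == 1:
--                 list_equ[i][0][k] = 1
--
--     return list_equ
-- ===== SOURCE B (Python) =====
-- EX_PERMUTATION = [3, 4, 1, 2, 6, 8, 5, 7, 3, 8, 2, 4]
--
-- PERMUTATION = [7, 4, 3, 6, 5, 8, 2, 1]
--
--
-- def koef_equ2(sbox_equation2):
--     # One fused pass: the bits of y are merged into x while y is being
--     # populated, so A's separate trailing rescan of list_equ disappears.
--     result = []
--     for bits_x, bits_y in sbox_equation2:
--         x = [0] * 17
--         y = [0] * 16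
--         key = [0] * 4
--         for k, c in enumerate(bits_x):
--             if c == "1":
--                 x[EX_PERMUTATION[k + 4] + 8] = 1
--                 key[k] = 1
--         for k in range(1, len(bits_y)):
--             if bits_y[k] == "1":
--                 j = PERMUTATION[k + 2]
--                 y[j] = 1
--                 x[j] = 1
--         result.append([x, y, key])
--     return result
-- ===== Notes on version B (the rewrite author's own statement) =====
-- stated objective: simpler
-- what changed: B fuses A's separate trailing merge pass (copying y's set bits into x over the whole list_equ) into the per-equation loop: x[j] is set together with y[j] while y is populated, so the result list is built in one pass by a per-pair map and the rescan disappears.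
import Mathlib
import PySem

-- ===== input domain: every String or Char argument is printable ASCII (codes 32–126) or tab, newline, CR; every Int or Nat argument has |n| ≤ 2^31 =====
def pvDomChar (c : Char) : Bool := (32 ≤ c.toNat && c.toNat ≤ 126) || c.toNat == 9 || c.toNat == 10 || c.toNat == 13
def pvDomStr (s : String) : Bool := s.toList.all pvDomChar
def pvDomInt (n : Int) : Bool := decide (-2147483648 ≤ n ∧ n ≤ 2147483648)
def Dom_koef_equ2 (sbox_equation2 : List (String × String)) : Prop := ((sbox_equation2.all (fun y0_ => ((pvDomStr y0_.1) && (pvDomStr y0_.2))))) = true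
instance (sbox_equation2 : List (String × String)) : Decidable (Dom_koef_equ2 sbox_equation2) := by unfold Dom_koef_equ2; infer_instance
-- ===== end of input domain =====

-- B merges y's set bits into x in the same fused pass that populates y, removing A's
-- separate trailing rescan of list_equ (objective: simpler; same return value).

-- ===== PORT A =====
def EX_PERMUTATION : List Int := [3, 4, 1, 2, 6, 8, 5, 7, 3, 8, 2, 4]

def PERMUTATION : List Int := [7, 4, 3, 6, 5, 8, 2, 1]

def koef_equ2 (sbox_equation2 : List (String × String)) : List (List (List Int)) :=
  let list_equ : List (List (List Int)) :=
    (PySem.List.pyRange 0 (PySem.List.len sbox_equation2) 1).foldl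
      (fun list_equ i =>
        let si := PySem.List.pyGetD sbox_equation2 i ("", "")
        let xk :=
          (PySem.List.pyRange 0 (PySem.List.len si.1.toList) 1).foldl
            (fun (st : List Int × List Int) k =>
              if PySem.List.pyGetD si.1.toList k ' ' = '1' then
                let index_X := PySem.List.pyGetD EX_PERMUTATION (k + 4) 0 + 8
                (PySem.List.pySetD st.1 index_X 1, PySem.List.pySetD st.2 k 1)
              else st)
            (List.replicate 17 0, List.replicate 4 0)
        let y :=
          (PySem.List.pyRange 0 (PySem.List.len si.2.toList - 1) 1).foldl
            (fun (y : List Int) k =>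
              if PySem.List.pyGetD si.2.toList (k + 1) ' ' = '1' then
                let index_Y := PySem.List.pyGetD PERMUTATION (k + 3) 0
                PySem.List.pySetD y index_Y 1
              else y)
            (List.replicate 16 0)
        list_equ ++ [[xk.1, y, xk.2]])
      []
  (PySem.List.pyRange 0 (PySem.List.len list_equ) 1).foldl
    (fun le i =>
      (PySem.List.pyRange 0
          (PySem.List.len (PySem.List.pyGetD (PySem.List.pyGetD le i []) 1 [])) 1).foldl
        (fun le k =>
          if PySem.List.pyGetD (PySem.List.pyGetD (PySem.List.pyGetD le i []) 1 []) k 0 = 1 then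
            PySem.List.pySetD le i
              (PySem.List.pySetD (PySem.List.pyGetD le i []) 0
                (PySem.List.pySetD (PySem.List.pyGetD (PySem.List.pyGetD le i []) 0 []) k 1))
          else le)
        le)
    list_equ

-- ===== PORT B =====
def koef_equ2_alt (sbox_equation2 : List (String × String)) : List (List (List Int)) :=
  sbox_equation2.map (fun p =>
    let xk :=
      (PySem.List.enumerate p.1.toList 0).foldl
        (fun (st : List Int × List Int) kc =>
          if kc.2 = '1' then
            (PySem.List.pySetD st.1 (PySem.List.pyGetD EX_PERMUTATION (kc.1 + 4) 0 + 8) 1,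
             PySem.List.pySetD st.2 kc.1 1)
          else st)
        (List.replicate 17 0, List.replicate 4 0)
    let xy :=
      (PySem.List.pyRange 1 (PySem.List.len p.2.toList) 1).foldl
        (fun (st : List Int × List Int) k =>
          if PySem.List.pyGetD p.2.toList k ' ' = '1' then
            let j := PySem.List.pyGetD PERMUTATION (k + 2) 0
            (PySem.List.pySetD st.1 j 1, PySem.List.pySetD st.2 j 1)
          else st)
        (xk.1, List.replicate 16 0)
    [xy.1, xy.2, xk.2])

-- ===== PRECONDITION & SPEC =====
-- Pre_ excludes exactly the inputs on which the Python A raises IndexError: a "1" at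
-- position ≥ 4 of a first bit-string (key[k] / EX_PERMUTATION[k+4] out of range) or a
-- "1" at position ≥ 6 of a second bit-string (PERMUTATION[k+3] out of range).
def Pre_koef_equ2 (sbox_equation2 : List (String × String)) : Prop :=
  ∀ p ∈ sbox_equation2,
    (∀ (k : Nat) (_ : k < p.1.toList.length), p.1.toList[k] = '1' → k < 4) ∧
    (∀ (k : Nat) (_ : k < p.2.toList.length), p.2.toList[k] = '1' → k ≤ 5)
instance (sbox_equation2 : List (String × String)) : Decidable (Pre_koef_equ2 sbox_equation2) := by
  unfold Pre_koef_equ2; infer_instance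

def pvWitness_koef_equ2 : (List (String × String)) := [("1010", "010100"), ("0011", "110")]

def Spec_koef_equ2 (sbox_equation2 : List (String × String)) (out : List (List (List Int))) : Prop := out = koef_equ2_alt sbox_equation2
instance (sbox_equation2 : List (String × String)) (out : List (List (List Int))) : Decidable (Spec_koef_equ2 sbox_equation2 out) := by unfold Spec_koef_equ2; infer_instance

-- ===== CLAIM (what is proved, stated in full; the proofs are below) =====
def Claim_equal_koef_equ2 : Prop := ∀ (sbox_equation2 : List (String × String)), Dom_koef_equ2 sbox_equation2 → Pre_koef_equ2 sbox_equation2 → Spec_koef_equ2 sbox_equation2 (koef_equ2 sbox_equation2)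

-- ===== LEMMAS AND PROOFS =====

-- A's first phase, per-equation build, named (definitionally the port's loop body).
def pvGA (p : String × String) : List (List Int) :=
  let xk :=
    (PySem.List.pyRange 0 (PySem.List.len p.1.toList) 1).foldl
      (fun (st : List Int × List Int) k =>
        if PySem.List.pyGetD p.1.toList k ' ' = '1' then
          let index_X := PySem.List.pyGetD EX_PERMUTATION (k + 4) 0 + 8
          (PySem.List.pySetD st.1 index_X 1, PySem.List.pySetD st.2 k 1)
        else st)
      (List.replicate 17 0, List.replicate 4 0)
  let y :=
    (PySem.List.pyRange 0 (PySem.List.len p.2.toList - 1) 1).foldl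
      (fun (y : List Int) k =>
        if PySem.List.pyGetD p.2.toList (k + 1) ' ' = '1' then
          let index_Y := PySem.List.pyGetD PERMUTATION (k + 3) 0
          PySem.List.pySetD y index_Y 1
        else y)
      (List.replicate 16 0)
  [xk.1, y, xk.2]

def pvPhase1 (l : List (String × String)) : List (List (List Int)) :=
  (PySem.List.pyRange 0 (PySem.List.len l) 1).foldl
    (fun acc i => acc ++ [pvGA (PySem.List.pyGetD l i ("", ""))]) []

-- A's merge-phase bodies, named.
def pvInnerBody (i : Int) (le : List (List (List Int))) (k : Int) : List (List (List Int)) :=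
  if PySem.List.pyGetD (PySem.List.pyGetD (PySem.List.pyGetD le i []) 1 []) k 0 = 1 then
    PySem.List.pySetD le i
      (PySem.List.pySetD (PySem.List.pyGetD le i []) 0
        (PySem.List.pySetD (PySem.List.pyGetD (PySem.List.pyGetD le i []) 0 []) k 1))
  else le

def pvOuterBody (le : List (List (List Int))) (i : Int) : List (List (List Int)) :=
  (PySem.List.pyRange 0
      (PySem.List.len (PySem.List.pyGetD (PySem.List.pyGetD le i []) 1 [])) 1).foldl
    (pvInnerBody i) le

-- A's merge restricted to one equation.
def pvElemBody (e : List (List Int)) (k : Int) : List (List Int) :=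
  if PySem.List.pyGetD (PySem.List.pyGetD e 1 []) k 0 = 1 then
    PySem.List.pySetD e 0
      (PySem.List.pySetD (PySem.List.pyGetD e 0 []) k 1)
  else e

def pvF (e : List (List Int)) : List (List Int) :=
  (PySem.List.pyRange 0 (PySem.List.len (PySem.List.pyGetD e 1 [])) 1).foldl pvElemBody e

-- set x to 1 at every index of ks where y holds a 1
def pvMergeL (ks : List Int) (y x : List Int) : List Int :=
  ks.foldl (fun x k => if PySem.List.pyGetD y k 0 = 1 then PySem.List.pySetD x k 1 else x) x

-- B's fused second-loop body, named (definitionally the port's lambda).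
def pvBBody (b : List Char) (st : List Int × List Int) (k : Int) : List Int × List Int :=
  if PySem.List.pyGetD b k ' ' = '1' then
    let j := PySem.List.pyGetD PERMUTATION (k + 2) 0
    (PySem.List.pySetD st.1 j 1, PySem.List.pySetD st.2 j 1)
  else st

-- B's per-equation build, named.
def pvGB (p : String × String) : List (List Int) :=
  let xk :=
    (PySem.List.enumerate p.1.toList 0).foldl
      (fun (st : List Int × List Int) kc =>
        if kc.2 = '1' then
          (PySem.List.pySetD st.1 (PySem.List.pyGetD EX_PERMUTATION (kc.1 + 4) 0 + 8) 1,
           PySem.List.pySetD st.2 kc.1 1)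
        else st)
      (List.replicate 17 0, List.replicate 4 0)
  let xy :=
    (PySem.List.pyRange 1 (PySem.List.len p.2.toList) 1).foldl (pvBBody p.2.toList)
      (xk.1, List.replicate 16 0)
  [xy.1, xy.2, xk.2]

theorem pvA_unfold (l : List (String × String)) :
    koef_equ2 l =
      (PySem.List.pyRange 0 (PySem.List.len (pvPhase1 l)) 1).foldl pvOuterBody (pvPhase1 l) := rfl

theorem pvB_unfold (l : List (String × String)) : koef_equ2_alt l = l.map pvGB := rfl

-- small facts
theorem pvRange_nil {a b : Int} (h : b ≤ a) : PySem.List.pyRange a b 1 = [] := by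
  refine List.eq_nil_iff_forall_not_mem.mpr fun x hx => ?_
  rw [PySem.List.mem_pyRange_one] at hx
  omega

theorem pvGetD_mid {α : Type} (pre : List α) (e : α) (post : List α) (d : α) :
    PySem.List.pyGetD (pre ++ e :: post) (pre.length : Int) d = e := by
  rw [PySem.List.pyGetD_natCast]
  simp [List.getD]

theorem pvSetD_mid {α : Type} (pre : List α) (e v : α) (post : List α) :
    PySem.List.pySetD (pre ++ e :: post) (pre.length : Int) v = pre ++ v :: post := by
  rw [PySem.List.pySetD_natCast]
  simp

theorem pvFoldLenInv {σ : Type} (f : σ → Int → σ) (g : σ → Nat)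
    (h : ∀ s k, g (f s k) = g s) : ∀ (ks : List Int) (s : σ), g (ks.foldl f s) = g s := by
  intro ks
  induction ks with
  | nil => intro s; rfl
  | cons k ks ih => intro s; rw [List.foldl_cons, ih, h]

theorem pvGetDSet (y : List Int) (j : Int) (hj : 0 ≤ j) (v : Int) (m : Nat) :
    PySem.List.pyGetD (PySem.List.pySetD y j v) (m : Int) 0 =
      if (m : Int) = j ∧ m < y.length then v else PySem.List.pyGetD y (m : Int) 0 := by
  rw [PySem.List.pySetD_of_nonneg _ _ hj, PySem.List.pyGetD_natCast,
    PySem.List.pyGetD_natCast]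
  simp only [List.getD, List.getElem?_set]
  split_ifs <;> simp_all <;> omega

theorem pvPerm_bounds (i : Int) :
    0 ≤ PySem.List.pyGetD PERMUTATION i 0 ∧ PySem.List.pyGetD PERMUTATION i 0 < 16 := by
  have hdef : PySem.List.pyGetD PERMUTATION i 0 =
      (PySem.List.pyGet? PERMUTATION i).getD 0 := rfl
  rcases h : PySem.List.pyGet? PERMUTATION i with _ | v
  · rw [hdef, h]; norm_num
  · have hv : v ∈ PERMUTATION := by
      exact PySem.List.mem_of_pyGet?_eq_some _ h
    rw [hdef, h, Option.getD_some]
    fin_cases hv <;> norm_num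

-- phase 1 of A is a map
theorem pvFirstPhase_eq_map (l : List (String × String)) : pvPhase1 l = l.map pvGA := by
  have h := PySem.List.foldl_pyRange_pyGetD l ("", "")
    (fun acc p => acc ++ [pvGA p]) ([] : List (List (List Int))) (le_refl 0)
  have h2 : pvPhase1 l =
      List.foldl (fun acc p => acc ++ [pvGA p]) ([] : List (List (List Int)))
        (l.drop (0 : Int).toNat) := h
  rw [h2, Int.toNat_zero, List.drop_zero, PySem.List.foldl_append_singleton_eq_map,
    List.nil_append]

-- the merge inner loop only touches equation number pre.length
theorem pvInnerFold (ks : List Int) (pre : List (List (List Int))) (e : List (List Int))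
    (post : List (List (List Int))) :
    ks.foldl (pvInnerBody (pre.length : Int)) (pre ++ e :: post) =
      pre ++ (ks.foldl pvElemBody e) :: post := by
  induction ks generalizing e with
  | nil => rfl
  | cons k ks ih =>
    rw [List.foldl_cons, List.foldl_cons]
    have hb : pvInnerBody (pre.length : Int) (pre ++ e :: post) k =
        pre ++ pvElemBody e k :: post := by
      unfold pvInnerBody pvElemBody
      rw [pvGetD_mid]
      split_ifs with h
      · rw [pvSetD_mid]
      · rfl
    rw [hb, ih]

-- A's trailing merge pass is a map of pvF
theorem pvMergePass (post pre : List (List (List Int))) :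
    (PySem.List.pyRange (pre.length : Int) ((pre.length : Int) + (post.length : Int)) 1).foldl
        pvOuterBody (pre ++ post) = pre ++ post.map pvF := by
  induction post generalizing pre with
  | nil =>
    simp only [List.length_nil, Nat.cast_zero, add_zero, List.append_nil, List.map_nil]
    rw [pvRange_nil le_rfl]
    rfl
  | cons e rest ih =>
    have hcons := PySem.List.pyRange_one_cons
      (show (pre.length : Int) < (pre.length : Int) + ((e :: rest).length : Int) by
        simp only [List.length_cons]; push_cast; omega)
    rw [hcons, List.foldl_cons]
    have hout : pvOuterBody (pre ++ e :: rest) (pre.length : Int) = pre ++ pvF e :: rest := by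
      unfold pvOuterBody pvF
      rw [pvGetD_mid, pvInnerFold]
    rw [hout]
    have ih' := ih (pre ++ [pvF e])
    have e2 : ((pre ++ [pvF e]).length : Int) + (rest.length : Int) =
        (pre.length : Int) + ((e :: rest).length : Int) := by
      simp only [List.length_append, List.length_cons, List.length_nil]; push_cast; ring
    have e1 : ((pre ++ [pvF e]).length : Int) = (pre.length : Int) + 1 := by
      simp only [List.length_append, List.length_cons, List.length_nil]; push_cast; ring
    rw [e2, e1] at ih'
    simpa using ih'

-- pvF on a triple [x, y, key] only rewrites x
theorem pvElemFold (ks : List Int) (x y key : List Int) :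
    ks.foldl pvElemBody [x, y, key] = [pvMergeL ks y x, y, key] := by
  induction ks generalizing x with
  | nil => rfl
  | cons k ks ih =>
    have hb : pvElemBody [x, y, key] k =
        [if PySem.List.pyGetD y k 0 = 1 then PySem.List.pySetD x k 1 else x, y, key] := by
      unfold pvElemBody
      have h1 : PySem.List.pyGetD [x, y, key] 1 [] = y := rfl
      have h0 : PySem.List.pyGetD [x, y, key] 0 [] = x := rfl
      rw [h1, h0]
      split_ifs with h
      · rfl
      · rfl
    rw [List.foldl_cons, hb, ih]
    unfold pvMergeL
    rw [List.foldl_cons]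

theorem pvMergeL_getElem? (ks : List Int) (y : List Int) (m : Nat) :
    ∀ (x : List Int), (∀ k ∈ ks, 0 ≤ k ∧ k < (x.length : Int)) →
    (pvMergeL ks y x)[m]? =
      if (m : Int) ∈ ks ∧ PySem.List.pyGetD y (m : Int) 0 = 1 then some 1 else x[m]? := by
  induction ks with
  | nil => intro x _; simp [pvMergeL]
  | cons k ks ih =>
    intro x hks
    obtain ⟨hk0, hkl⟩ := hks k List.mem_cons_self
    unfold pvMergeL
    rw [List.foldl_cons]
    by_cases hc : PySem.List.pyGetD y k 0 = 1
    · rw [if_pos hc, PySem.List.pySetD_of_nonneg _ _ hk0]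
      have ih' := ih (x.set k.toNat 1)
        (fun k' hk' => by
          have := hks k' (List.mem_cons_of_mem _ hk')
          simpa [List.length_set] using this)
      rw [show List.foldl
          (fun x k => if PySem.List.pyGetD y k 0 = 1 then PySem.List.pySetD x k 1 else x)
          (x.set k.toNat 1) ks = pvMergeL ks y (x.set k.toNat 1) from rfl, ih']
      by_cases hP : PySem.List.pyGetD y (m : Int) 0 = 1
      · by_cases hm : (m : Int) ∈ ks
        · rw [if_pos ⟨hm, hP⟩,
            if_pos (show (m : Int) ∈ k :: ks ∧ PySem.List.pyGetD y (m : Int) 0 = 1 from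
              ⟨List.mem_cons.mpr (Or.inr hm), hP⟩)]
        · by_cases hmk : (m : Int) = k
          · rw [if_neg (show ¬((m : Int) ∈ ks ∧ PySem.List.pyGetD y (m : Int) 0 = 1) from
                fun h => hm h.1),
              if_pos (show (m : Int) ∈ k :: ks ∧ PySem.List.pyGetD y (m : Int) 0 = 1 from
                ⟨List.mem_cons.mpr (Or.inl hmk), hP⟩),
              List.getElem?_set, if_pos (by omega : k.toNat = m),
              if_pos (by omega : k.toNat < x.length)]
          · rw [if_neg (show ¬((m : Int) ∈ ks ∧ PySem.List.pyGetD y (m : Int) 0 = 1) from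
                fun h => hm h.1),
              if_neg (show ¬((m : Int) ∈ k :: ks ∧ PySem.List.pyGetD y (m : Int) 0 = 1) from
                fun h => hmk ((List.mem_cons.mp h.1).resolve_right hm)),
              List.getElem?_set, if_neg (by omega : ¬ k.toNat = m)]
      · have hmk : (m : Int) ≠ k := fun h => hP (by rw [h]; exact hc)
        rw [if_neg (show ¬((m : Int) ∈ ks ∧ PySem.List.pyGetD y (m : Int) 0 = 1) from
            fun h => hP h.2),
          if_neg (show ¬((m : Int) ∈ k :: ks ∧ PySem.List.pyGetD y (m : Int) 0 = 1) from
            fun h => hP h.2),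
          List.getElem?_set, if_neg (by omega : ¬ k.toNat = m)]
    · rw [if_neg hc]
      have ih' := ih x (fun k' hk' => hks k' (List.mem_cons_of_mem _ hk'))
      rw [show List.foldl
          (fun x k => if PySem.List.pyGetD y k 0 = 1 then PySem.List.pySetD x k 1 else x) x ks =
          pvMergeL ks y x from rfl, ih']
      by_cases hP : PySem.List.pyGetD y (m : Int) 0 = 1
      · have hmk : (m : Int) ≠ k := fun h => hc (by rw [← h]; exact hP)
        by_cases hm : (m : Int) ∈ ks
        · rw [if_pos ⟨hm, hP⟩,
            if_pos (show (m : Int) ∈ k :: ks ∧ PySem.List.pyGetD y (m : Int) 0 = 1 from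
              ⟨List.mem_cons.mpr (Or.inr hm), hP⟩)]
        · rw [if_neg (show ¬((m : Int) ∈ ks ∧ PySem.List.pyGetD y (m : Int) 0 = 1) from
              fun h => hm h.1),
            if_neg (show ¬((m : Int) ∈ k :: ks ∧ PySem.List.pyGetD y (m : Int) 0 = 1) from
              fun h => hmk ((List.mem_cons.mp h.1).resolve_right hm))]
      · rw [if_neg (show ¬((m : Int) ∈ ks ∧ PySem.List.pyGetD y (m : Int) 0 = 1) from
            fun h => hP h.2),
          if_neg (show ¬((m : Int) ∈ k :: ks ∧ PySem.List.pyGetD y (m : Int) 0 = 1) from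
            fun h => hP h.2)]

theorem pvBase (y x : List Int) (hx : x.length = 17)
    (hsub : ∀ m : Nat, m < 16 → PySem.List.pyGetD y (m : Int) 0 = 1 → x[m]? = some 1) :
    pvMergeL (PySem.List.pyRange 0 16 1) y x = x := by
  apply List.ext_getElem?
  intro m
  rw [pvMergeL_getElem? _ _ m x
    (fun k hk => by rw [PySem.List.mem_pyRange_one] at hk; omega)]
  by_cases hm : ((m : Int) ∈ PySem.List.pyRange 0 16 1 ∧ PySem.List.pyGetD y (m : Int) 0 = 1)
  · rw [if_pos hm]
    have hm16 : m < 16 := by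
      have := hm.1; rw [PySem.List.mem_pyRange_one] at this; omega
    exact (hsub m hm16 hm.2).symm
  · rw [if_neg hm]

theorem pvAbsorb (y x : List Int) (j : Int) (hx : x.length = 17) (hj0 : 0 ≤ j) (hj1 : j < 16)
    (hy : PySem.List.pyGetD y j 0 = 1) :
    pvMergeL (PySem.List.pyRange 0 16 1) y (PySem.List.pySetD x j 1) =
      pvMergeL (PySem.List.pyRange 0 16 1) y x := by
  apply List.ext_getElem?
  intro m
  rw [pvMergeL_getElem? _ _ m (PySem.List.pySetD x j 1)
    (fun k hk => by
      rw [PySem.List.mem_pyRange_one] at hk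
      rw [PySem.List.length_pySetD]
      omega),
    pvMergeL_getElem? _ _ m x
    (fun k hk => by rw [PySem.List.mem_pyRange_one] at hk; omega)]
  by_cases hm : ((m : Int) ∈ PySem.List.pyRange 0 16 1 ∧ PySem.List.pyGetD y (m : Int) 0 = 1)
  · rw [if_pos hm, if_pos hm]
  · rw [if_neg hm, if_neg hm]
    have hmj : (m : Int) ≠ j := by
      intro h
      exact hm ⟨by rw [PySem.List.mem_pyRange_one]; omega, by rw [h]; exact hy⟩
    rw [PySem.List.pySetD_of_nonneg _ _ hj0]
    rw [List.getElem?_set, if_neg (by omega : ¬ j.toNat = m)]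

theorem pvFusedSnd (b : List Char) (ks : List Int) (st : List Int × List Int) :
    (ks.foldl (pvBBody b) st).2 =
      ks.foldl
        (fun y k =>
          if PySem.List.pyGetD b k ' ' = '1' then
            PySem.List.pySetD y (PySem.List.pyGetD PERMUTATION (k + 2) 0) 1
          else y)
        st.2 := by
  induction ks generalizing st with
  | nil => rfl
  | cons k ks ih =>
    rw [List.foldl_cons, List.foldl_cons, ih]
    congr 1
    unfold pvBBody
    split_ifs <;> rfl

theorem pvMono (b : List Char) (ks : List Int) (m : Nat) :
    ∀ (st : List Int × List Int), PySem.List.pyGetD st.2 (m : Int) 0 = 1 →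
    PySem.List.pyGetD ((ks.foldl (pvBBody b) st).2) (m : Int) 0 = 1 := by
  induction ks with
  | nil => intro st h; exact h
  | cons k ks ih =>
    intro st h
    rw [List.foldl_cons]
    apply ih
    unfold pvBBody
    split_ifs with hc
    · dsimp only
      rw [pvGetDSet st.2 _ (pvPerm_bounds (k + 2)).1 1 m]
      split_ifs with h2
      · rfl
      · exact h
    · exact h

theorem pvFusedFst (b : List Char) (ks : List Int) :
    ∀ (x y : List Int), x.length = 17 → y.length = 16 →
    (∀ m : Nat, m < 16 → PySem.List.pyGetD y (m : Int) 0 = 1 → x[m]? = some 1) →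
    (ks.foldl (pvBBody b) (x, y)).1 =
      pvMergeL (PySem.List.pyRange 0 16 1) ((ks.foldl (pvBBody b) (x, y)).2) x := by
  induction ks with
  | nil =>
    intro x y hx hy hsub
    exact (pvBase y x hx hsub).symm
  | cons k ks ih =>
    intro x y hx hy hsub
    rw [List.foldl_cons]
    by_cases hc : PySem.List.pyGetD b k ' ' = '1'
    · have hbb : pvBBody b (x, y) k =
          (PySem.List.pySetD x (PySem.List.pyGetD PERMUTATION (k + 2) 0) 1,
           PySem.List.pySetD y (PySem.List.pyGetD PERMUTATION (k + 2) 0) 1) := by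
        unfold pvBBody; rw [if_pos hc]
      obtain ⟨hj0, hj16⟩ := pvPerm_bounds (k + 2)
      set j := PySem.List.pyGetD PERMUTATION (k + 2) 0 with hjdef
      rw [hbb]
      have hx' : (PySem.List.pySetD x j 1).length = 17 := by
        rw [PySem.List.length_pySetD, hx]
      have hy' : (PySem.List.pySetD y j 1).length = 16 := by
        rw [PySem.List.length_pySetD, hy]
      have hsub' : ∀ m : Nat, m < 16 →
          PySem.List.pyGetD (PySem.List.pySetD y j 1) (m : Int) 0 = 1 →
          (PySem.List.pySetD x j 1)[m]? = some 1 := by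
        intro m hm16 hgy
        rw [pvGetDSet y j hj0 1 m] at hgy
        rw [PySem.List.pySetD_of_nonneg _ _ hj0, List.getElem?_set]
        by_cases hmj : (m : Int) = j
        · rw [if_pos (by omega : j.toNat = m), if_pos (by omega : j.toNat < x.length)]
        · rw [if_neg (by omega : ¬ j.toNat = m)]
          rw [if_neg (by exact fun hh => hmj hh.1)] at hgy
          exact hsub m hm16 hgy
      rw [ih (PySem.List.pySetD x j 1) (PySem.List.pySetD y j 1) hx' hy' hsub']
      have hyj : PySem.List.pyGetD (PySem.List.pySetD y j 1) ((j.toNat : Nat) : Int) 0 = 1 := by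
        rw [pvGetDSet y j hj0 1 j.toNat, if_pos ⟨by omega, by omega⟩]
      have hmono := pvMono b ks j.toNat (PySem.List.pySetD x j 1, PySem.List.pySetD y j 1) hyj
      rw [show ((j.toNat : Nat) : Int) = j by omega] at hmono
      exact pvAbsorb _ x j hx hj0 hj16 hmono
    · have hbb : pvBBody b (x, y) k = (x, y) := by unfold pvBBody; rw [if_neg hc]
      rw [hbb]
      exact ih x y hx hy hsub

theorem pvRangeShift (a b : Int) :
    PySem.List.pyRange (a + 1) (b + 1) 1 = (PySem.List.pyRange a b 1).map (· + 1) := by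
  have key : ∀ n : Nat, ∀ a b : Int, b - a ≤ n →
      PySem.List.pyRange (a + 1) (b + 1) 1 = (PySem.List.pyRange a b 1).map (· + 1) := by
    intro n
    induction n with
    | zero =>
      intro a b h
      rw [pvRange_nil (by omega), pvRange_nil (by omega), List.map_nil]
    | succ n ihn =>
      intro a b h
      by_cases h' : b ≤ a
      · rw [pvRange_nil (by omega), pvRange_nil (by omega), List.map_nil]
      · rw [PySem.List.pyRange_one_cons (by omega : a < b),
          PySem.List.pyRange_one_cons (by omega : a + 1 < b + 1),
          List.map_cons, ihn (a + 1) b (by omega)]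
  exact key (b - a).toNat a b (by omega)

theorem pvGet1 (x y key : List Int) : PySem.List.pyGetD [x, y, key] 1 [] = y := rfl

theorem pvCombine (b : List Char) (x key : List Int) (hx : x.length = 17) :
    pvF [x,
      (PySem.List.pyRange 0 (PySem.List.len b - 1) 1).foldl
        (fun (y : List Int) k =>
          if PySem.List.pyGetD b (k + 1) ' ' = '1' then
            PySem.List.pySetD y (PySem.List.pyGetD PERMUTATION (k + 3) 0) 1
          else y)
        (List.replicate 16 0),
      key] =
    [((PySem.List.pyRange 1 (PySem.List.len b) 1).foldl (pvBBody b) (x, List.replicate 16 0)).1,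
     ((PySem.List.pyRange 1 (PySem.List.len b) 1).foldl (pvBBody b) (x, List.replicate 16 0)).2,
     key] := by
  have hyA_len :
      ((PySem.List.pyRange 0 (PySem.List.len b - 1) 1).foldl
        (fun (y : List Int) k =>
          if PySem.List.pyGetD b (k + 1) ' ' = '1' then
            PySem.List.pySetD y (PySem.List.pyGetD PERMUTATION (k + 3) 0) 1
          else y)
        (List.replicate 16 0)).length = 16 := by
    have := pvFoldLenInv
      (fun (y : List Int) k =>
        if PySem.List.pyGetD b (k + 1) ' ' = '1' then
          PySem.List.pySetD y (PySem.List.pyGetD PERMUTATION (k + 3) 0) 1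
        else y)
      List.length
      (fun s k => by dsimp only; split_ifs <;> simp [PySem.List.length_pySetD])
      (PySem.List.pyRange 0 (PySem.List.len b - 1) 1) (List.replicate 16 0)
    simpa using this
  have hsnd :
      ((PySem.List.pyRange 1 (PySem.List.len b) 1).foldl (pvBBody b)
          (x, List.replicate 16 0)).2 =
      (PySem.List.pyRange 0 (PySem.List.len b - 1) 1).foldl
        (fun (y : List Int) k =>
          if PySem.List.pyGetD b (k + 1) ' ' = '1' then
            PySem.List.pySetD y (PySem.List.pyGetD PERMUTATION (k + 3) 0) 1
          else y)
        (List.replicate 16 0) := by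
    rw [pvFusedSnd]
    have hr : PySem.List.pyRange 1 (PySem.List.len b) 1 =
        (PySem.List.pyRange 0 (PySem.List.len b - 1) 1).map (· + 1) := by
      have h := pvRangeShift 0 (PySem.List.len b - 1)
      rw [show PySem.List.len b - 1 + 1 = PySem.List.len b by ring, zero_add] at h
      exact h
    rw [hr, List.foldl_map]
    dsimp only
    simp only [show ∀ k : Int, k + 1 + 2 = k + 3 from fun k => by ring]
  have hsub0 : ∀ m : Nat, m < 16 →
      PySem.List.pyGetD (List.replicate 16 (0 : Int)) (m : Int) 0 = 1 → x[m]? = some 1 := by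
    intro m hm h
    rw [PySem.List.pyGetD_natCast, List.getD_eq_getElem?_getD, List.getElem?_replicate,
      if_pos hm] at h
    simp at h
  have hfst := pvFusedFst b (PySem.List.pyRange 1 (PySem.List.len b) 1) x
    (List.replicate 16 0) hx (by simp) hsub0
  rw [hsnd] at hfst
  have hlen16 : PySem.List.len
      ((PySem.List.pyRange 0 (PySem.List.len b - 1) 1).foldl
        (fun (y : List Int) k =>
          if PySem.List.pyGetD b (k + 1) ' ' = '1' then
            PySem.List.pySetD y (PySem.List.pyGetD PERMUTATION (k + 3) 0) 1
          else y)
        (List.replicate 16 0)) = (16 : Int) := by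
    rw [PySem.List.len_eq, hyA_len]; norm_num
  unfold pvF
  rw [pvGet1, hlen16, pvElemFold, ← hfst, ← hsnd]

-- the per-equation statement: A's build followed by its merge equals B's fused build
theorem pvPair (p : String × String) : pvF (pvGA p) = pvGB p := by
  simp only [pvGA, pvGB]
  have hfirst :
      (PySem.List.enumerate p.1.toList 0).foldl
        (fun (st : List Int × List Int) kc =>
          if kc.2 = '1' then
            (PySem.List.pySetD st.1 (PySem.List.pyGetD EX_PERMUTATION (kc.1 + 4) 0 + 8) 1,
             PySem.List.pySetD st.2 kc.1 1)
          else st)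
        (List.replicate 17 0, List.replicate 4 0) =
      (PySem.List.pyRange 0 (PySem.List.len p.1.toList) 1).foldl
        (fun (st : List Int × List Int) k =>
          if PySem.List.pyGetD p.1.toList k ' ' = '1' then
            (PySem.List.pySetD st.1 (PySem.List.pyGetD EX_PERMUTATION (k + 4) 0 + 8) 1,
             PySem.List.pySetD st.2 k 1)
          else st)
        (List.replicate 17 0, List.replicate 4 0) := by
    rw [PySem.List.enumerate_eq_map_pyRange p.1.toList ' ', List.foldl_map]
  rw [hfirst]
  have hx :
      ((PySem.List.pyRange 0 (PySem.List.len p.1.toList) 1).foldl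
        (fun (st : List Int × List Int) k =>
          if PySem.List.pyGetD p.1.toList k ' ' = '1' then
            (PySem.List.pySetD st.1 (PySem.List.pyGetD EX_PERMUTATION (k + 4) 0 + 8) 1,
             PySem.List.pySetD st.2 k 1)
          else st)
        (List.replicate 17 0, List.replicate 4 0)).1.length = 17 := by
    have := pvFoldLenInv
      (fun (st : List Int × List Int) k =>
        if PySem.List.pyGetD p.1.toList k ' ' = '1' then
          (PySem.List.pySetD st.1 (PySem.List.pyGetD EX_PERMUTATION (k + 4) 0 + 8) 1,
           PySem.List.pySetD st.2 k 1)
        else st)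
      (fun st => st.1.length)
      (fun s k => by dsimp only; split_ifs <;> simp [PySem.List.length_pySetD])
      (PySem.List.pyRange 0 (PySem.List.len p.1.toList) 1)
      (List.replicate 17 0, List.replicate 4 0)
    simpa using this
  exact pvCombine p.2.toList _ _ hx

-- ===== VERDICT (by name: the statement is the Claim_ definition above) =====
theorem koef_equ2_spec : Claim_equal_koef_equ2 := by
  intro l _ _
  unfold Spec_koef_equ2
  rw [pvA_unfold, pvB_unfold, pvFirstPhase_eq_map]
  have h := pvMergePass (l.map pvGA) []
  simp only [List.length_nil, Nat.cast_zero, List.nil_append, zero_add] at h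
  rw [PySem.List.len_eq, h, List.map_map]
  exact List.map_congr_left (fun p _ => pvPair p)
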